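-- pv_equiv track=rewrite | github.com/agonzales-dlcz/codigo-de-prueba-aps-acc | extractor.py | leer_parametros
-- ===== SOURCE A (Python) =====
-- PARAMETROS = [
--     "CSRT-Partida1",
--     "CSRT-DescripcionPartida1",
--     "CSRT-Bloque",
--     "CSRT-Nivel",
--     "CSRT-Unidad1",
--     "CSRT-FechaInicia1",
--     "CSRT-FechaFin1",
--     "CSRT-ProtocoloCalidad1",
--     "CSRT-FechaAprobacionProtocolo1",
-- ]
--
-- def leer_parametros(elemento: dict) -> dict:
--     diccionario_de_parametros = {parametro: "" for parametro in PARAMETROS}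
--     propiedades = elemento.get("properties", {}) # -> obtener propiedades sino vacío
--
--     for grupo_de_propiedades in propiedades.values():
--         if not isinstance(grupo_de_propiedades, dict): # -> si el grupo_de_propiedades no es diccionario
--             continue
--         for parametro in PARAMETROS:
--             if parametro in grupo_de_propiedades and diccionario_de_parametros[parametro] == "": # -> parámetro encontrado y aún no asignado → guardar primer valor
--                 diccionario_de_parametros[parametro] = str(grupo_de_propiedades[parametro])
--
--     return diccionario_de_parametros
-- ===== SOURCE B (Python) =====
-- PARAMETROS = [
--     "CSRT-Partida1",
--     "CSRT-DescripcionPartida1",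
--     "CSRT-Bloque",
--     "CSRT-Nivel",
--     "CSRT-Unidad1",
--     "CSRT-FechaInicia1",
--     "CSRT-FechaFin1",
--     "CSRT-ProtocoloCalidad1",
--     "CSRT-FechaAprobacionProtocolo1",
-- ]
--
-- def leer_parametros(elemento: dict) -> dict:
--     propiedades = elemento.get("properties", {})
--     # one reverse-merge pass: overwrite with every non-empty stringified value,
--     # so the earliest group's non-empty value is the final one per key
--     merged = {}
--     for grupo in reversed(list(propiedades.values())):
--         if not isinstance(grupo, dict):
--             continue
--         for clave in grupo:
--             texto = str(grupo[clave])
--             if texto != "":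
--                 merged[clave] = texto
--     return {parametro: merged.get(parametro, "") for parametro in PARAMETROS}
-- ===== Notes on version B (the rewrite author's own statement) =====
-- stated objective: alternative
-- what changed: A fills a sentinel-initialised result dict in one pass with a nested 9-parameter scan per group; B never scans parameters inside the loop: it builds one merged index by overwriting non-empty values while walking the groups in reverse order (so the earliest group's non-empty value ends up stored), then answers the 9 parameters by plain lookups.
import Mathlib
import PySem

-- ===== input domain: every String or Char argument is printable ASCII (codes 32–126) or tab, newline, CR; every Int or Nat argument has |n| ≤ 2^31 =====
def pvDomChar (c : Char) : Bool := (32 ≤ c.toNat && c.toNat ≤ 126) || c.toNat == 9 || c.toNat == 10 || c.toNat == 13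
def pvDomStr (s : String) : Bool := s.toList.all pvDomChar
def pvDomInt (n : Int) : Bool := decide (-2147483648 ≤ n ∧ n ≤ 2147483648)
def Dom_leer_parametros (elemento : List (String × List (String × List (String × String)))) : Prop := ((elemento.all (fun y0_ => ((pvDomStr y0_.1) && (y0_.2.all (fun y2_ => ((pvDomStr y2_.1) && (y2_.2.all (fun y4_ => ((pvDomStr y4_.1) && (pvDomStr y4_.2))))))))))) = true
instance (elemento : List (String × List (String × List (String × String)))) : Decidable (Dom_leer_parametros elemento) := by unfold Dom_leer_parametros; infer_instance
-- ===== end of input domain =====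

-- B replaces A's sentinel-guarded accumulating pass by a reverse-merge index: one pass over the
-- groups in reverse order overwriting non-empty values, then nine plain lookups (objective: alternative).
-- Under the type convention every group is a dict, so Python's isinstance check is vacuous in the ports.

-- ===== PORT A =====
def PARAMETROS : List String := [
  "CSRT-Partida1",
  "CSRT-DescripcionPartida1",
  "CSRT-Bloque",
  "CSRT-Nivel",
  "CSRT-Unidad1",
  "CSRT-FechaInicia1",
  "CSRT-FechaFin1",
  "CSRT-ProtocoloCalidad1",
  "CSRT-FechaAprobacionProtocolo1"]

-- A: initialise every parameter to "", then for each group of properties (in order) and each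
-- parameter, store str(value) the first time the slot is still "".  str on a string is the string.
def leer_parametros (elemento : List (String × List (String × List (String × String)))) : List (String × String) :=
  let dic0 : PySem.Dict String String :=
    PARAMETROS.foldl (fun d parametro => d.insert parametro "") PySem.Dict.empty
  let propiedades : List (String × List (String × String)) :=
    (PySem.Dict.mk elemento).getD "properties" []
  let dic := propiedades.foldl (fun d grupo =>
      PARAMETROS.foldl (fun d parametro =>
        match (PySem.Dict.mk grupo.2).get? parametro with
        | some valor => if d.getD parametro "" == "" then d.insert parametro valor else d
        | none => d) d) dic0
  dic.items

-- ===== PORT B =====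
-- one group merged into the index: every key whose str(value) is non-empty overwrites
def mergedStep (d : PySem.Dict String String) (g : List (String × String)) : PySem.Dict String String :=
  (PySem.Dict.mk g).keys.foldl (fun d clave =>
    match (PySem.Dict.mk g).get? clave with
    | some texto => if texto ≠ "" then d.insert clave texto else d
    | none => d) d

def leer_parametros_alt (elemento : List (String × List (String × List (String × String)))) : List (String × String) :=
  let propiedades : List (String × List (String × String)) :=
    (PySem.Dict.mk elemento).getD "properties" []
  let grupos : List (List (String × String)) := propiedades.map (·.2)
  let merged := grupos.reverse.foldl mergedStep PySem.Dict.empty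
  PARAMETROS.map (fun parametro => (parametro, merged.getD parametro ""))

-- ===== PRECONDITION & SPEC =====
def Spec_leer_parametros (elemento : List (String × List (String × List (String × String)))) (out : List (String × String)) : Prop := out = leer_parametros_alt elemento
instance (elemento : List (String × List (String × List (String × String)))) (out : List (String × String)) : Decidable (Spec_leer_parametros elemento out) := by unfold Spec_leer_parametros; infer_instance

-- ===== CLAIM (what is proved, stated in full; the proofs are below) =====
def Claim_equal_leer_parametros : Prop := ∀ (elemento : List (String × List (String × List (String × String)))), Dom_leer_parametros elemento → Spec_leer_parametros elemento (leer_parametros elemento)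

-- ===== LEMMAS AND PROOFS =====

-- A's result per parameter: the first group whose stored value for it is non-empty (else "")
def primerValor (grupos : List (List (String × String))) (parametro : String) : String :=
  match grupos with
  | [] => ""
  | g :: rest =>
    match (PySem.Dict.mk g).get? parametro with
    | some valor => if valor ≠ "" then valor else primerValor rest parametro
    | none => primerValor rest parametro

-- the value a parameter's slot holds after A processes one group, as a function of the old slot
def slotW (g : List (String × String)) (v : String → String) (p : String) : String :=
  match (PySem.Dict.mk g).get? p with
  | some valor => if v p == "" then valor else v p
  | none => v p

-- get? skips a prefix containing no matching key
lemma get?_mk_append_of_notin (pre rest : List (String × String)) (p : String)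
    (h : ∀ q ∈ pre, q.1 ≠ p) :
    (PySem.Dict.mk (pre ++ rest)).get? p = (PySem.Dict.mk rest).get? p := by
  induction pre with
  | nil => simp
  | cons q pre ih =>
    rw [List.cons_append, PySem.Dict.get?_mk_cons]
    have hq : (q.1 == p) = false := by
      simpa using h q (by simp)
    simp [hq]
    exact ih (fun r hr => h r (by simp [hr]))

-- insert replaces exactly the one existing occurrence of the key
lemma insert_mk_middle (pre tail : List (String × String)) (p x s : String)
    (hpre : ∀ q ∈ pre, q.1 ≠ p) (htail : ∀ q ∈ tail, q.1 ≠ p) :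
    (PySem.Dict.mk (pre ++ (p, x) :: tail)).insert p s
      = PySem.Dict.mk (pre ++ (p, s) :: tail) := by
  apply PySem.Dict.ext
  have hcont : (PySem.Dict.mk (pre ++ (p, x) :: tail)).contains p = true := by
    have := get?_mk_append_of_notin pre ((p, x) :: tail) p hpre
    rw [PySem.Dict.contains_eq_isSome_get?, this, PySem.Dict.get?_mk_cons]
    simp
  rw [PySem.Dict.items_insert_of_contains _ s hcont]
  show (pre ++ (p, x) :: tail).map _ = _
  rw [List.map_append, List.map_cons]
  congr 1
  · conv_rhs => rw [← List.map_id pre]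
    apply List.map_congr_left
    intro q hq
    have : (q.1 == p) = false := by simpa using hpre q hq
    simp [this]
  · simp only [beq_self_eq_true, if_pos]
    congr 1
    conv_rhs => rw [← List.map_id tail]
    apply List.map_congr_left
    intro q hq
    have : (q.1 == p) = false := by simpa using htail q hq
    simp [this]

-- one group's inner loop over the parameters in A, acting on a slot-map state
lemma inner_fold (g2 : List (String × String)) :
    ∀ (L : List String) (v : String → String) (pre : List (String × String)),
      L.Nodup → (∀ q ∈ pre, q.1 ∉ L) →
      L.foldl (fun d parametro =>
        match (PySem.Dict.mk g2).get? parametro with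
        | some valor => if d.getD parametro "" == "" then d.insert parametro valor else d
        | none => d) (PySem.Dict.mk (pre ++ L.map (fun p => (p, v p))))
      = PySem.Dict.mk (pre ++ L.map (fun p => (p, slotW g2 v p))) := by
  intro L
  induction L with
  | nil => intro v pre _ _; simp
  | cons p L ih =>
    intro v pre hnd hpre
    have hndL : L.Nodup := (List.nodup_cons.mp hnd).2
    have hpL : p ∉ L := (List.nodup_cons.mp hnd).1
    have hpre' : ∀ q ∈ pre, q.1 ≠ p := fun q hq => by
      have := hpre q hq; simp at this; exact this.1
    have hgetd : (PySem.Dict.mk (pre ++ (p, v p) :: L.map (fun p => (p, v p)))).getD p "" = v p := by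
      rw [PySem.Dict.getD_eq_get?_getD, get?_mk_append_of_notin _ _ _ hpre',
        PySem.Dict.get?_mk_cons]
      simp
    have hLmap : ∀ q ∈ L.map (fun p => (p, v p)), q.1 ≠ p := by
      intro q hq
      rcases List.mem_map.mp hq with ⟨r, hr, rfl⟩
      intro h; exact hpL (h ▸ hr)
    -- reusable continuation: state with slot p already final
    have cont : ∀ s : String,
        L.foldl (fun d parametro =>
          match (PySem.Dict.mk g2).get? parametro with
          | some valor => if d.getD parametro "" == "" then d.insert parametro valor else d
          | none => d) (PySem.Dict.mk ((pre ++ [(p, s)]) ++ L.map (fun p => (p, v p))))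
        = PySem.Dict.mk ((pre ++ [(p, s)]) ++ L.map (fun p => (p, slotW g2 v p))) := by
      intro s
      apply ih v (pre ++ [(p, s)]) hndL
      intro q hq
      rcases List.mem_append.mp hq with h | h
      · exact fun hm => (hpre q h) (by simp [hm])
      · simp at h; subst h; exact hpL
    simp only [List.map_cons, List.foldl_cons]
    cases hg : (PySem.Dict.mk g2).get? p with
    | none =>
      have := cont (v p)
      simp only [List.append_assoc, List.singleton_append] at this
      rw [this]
      have : slotW g2 v p = v p := by simp [slotW, hg]
      rw [this]
    | some valor =>
      simp only [hgetd]
      by_cases hv : v p = ""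
      · rw [if_pos (by simp [hv])]
        rw [insert_mk_middle pre _ p (v p) valor hpre' hLmap]
        have := cont valor
        simp only [List.append_assoc, List.singleton_append] at this
        rw [this]
        have : slotW g2 v p = valor := by simp [slotW, hg, hv]
        rw [this]
      · rw [if_neg (by simp [hv])]
        have := cont (v p)
        simp only [List.append_assoc, List.singleton_append] at this
        rw [this]
        have : slotW g2 v p = v p := by simp [slotW, hg, hv]
        rw [this]

lemma params_nodup : PARAMETROS.Nodup := by decide

-- A's whole outer loop, characterised per parameter against primerValor
lemma outer_fold :
    ∀ (props : List (String × List (String × String))) (v : String → String),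
      props.foldl (fun d grupo =>
        PARAMETROS.foldl (fun d parametro =>
          match (PySem.Dict.mk grupo.2).get? parametro with
          | some valor => if d.getD parametro "" == "" then d.insert parametro valor else d
          | none => d) d) (PySem.Dict.mk (PARAMETROS.map (fun p => (p, v p))))
      = PySem.Dict.mk (PARAMETROS.map (fun p =>
          (p, if v p = "" then primerValor (props.map (·.2)) p else v p))) := by
  intro props
  induction props with
  | nil =>
    intro v
    simp only [List.foldl_nil, List.map_nil]
    congr 1
    apply List.map_congr_left
    intro p _
    by_cases hv : v p = "" <;> simp [primerValor, hv]
  | cons g props ih =>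
    intro v
    rw [List.foldl_cons]
    have h1 := inner_fold g.2 PARAMETROS v [] params_nodup (by simp)
    simp only [List.nil_append] at h1
    rw [h1, ih (slotW g.2 v)]
    congr 1
    apply List.map_congr_left
    intro p _
    have : primerValor ((g :: props).map (·.2)) p =
        match (PySem.Dict.mk g.2).get? p with
        | some valor => if valor ≠ "" then valor else primerValor (props.map (·.2)) p
        | none => primerValor (props.map (·.2)) p := by
      simp [primerValor]
    rw [this]
    by_cases hv : v p = ""
    · cases hg : (PySem.Dict.mk g.2).get? p with
      | none => simp [slotW, hg, hv]
      | some valor =>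
        by_cases hval : valor = ""
        · simp [slotW, hg, hv, hval]
        · simp [slotW, hg, hv, hval]
    · cases hg : (PySem.Dict.mk g.2).get? p with
      | none => simp [slotW, hg, hv]
      | some valor => simp [slotW, hg, hv]

lemma dic0_eq :
    PARAMETROS.foldl (fun d parametro => d.insert parametro "") PySem.Dict.empty
      = PySem.Dict.mk (PARAMETROS.map (fun p => (p, ""))) := by decide

-- B's inner key loop over one group: a lookup through it sees the group's first-occurrence
-- value if that value is non-empty, else what the accumulator held
lemma mergedStep_fold_get? (g : List (String × String)) (p : String) :
    ∀ (L : List String) (d : PySem.Dict String String),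
      (L.foldl (fun d clave =>
        match (PySem.Dict.mk g).get? clave with
        | some texto => if texto ≠ "" then d.insert clave texto else d
        | none => d) d).get? p
      = if p ∈ L then
          (match (PySem.Dict.mk g).get? p with
           | some texto => if texto ≠ "" then some texto else d.get? p
           | none => d.get? p)
        else d.get? p := by
  intro L
  induction L with
  | nil => intro d; simp
  | cons k L ih =>
    intro d
    rw [List.foldl_cons, ih]
    by_cases hk : k = p
    · subst hk
      cases hg : (PySem.Dict.mk g).get? k with
      | none => simp
      | some texto =>
        by_cases ht : texto = ""
        · simp [ht]
        · by_cases hmem : k ∈ L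
          · simp [ht, hmem]
          · simp [ht, hmem, PySem.Dict.get?_insert_self]
    · have hstep : (match (PySem.Dict.mk g).get? k with
          | some texto => if texto ≠ "" then d.insert k texto else d
          | none => d).get? p = d.get? p := by
        cases hg : (PySem.Dict.mk g).get? k with
        | none => rfl
        | some texto =>
          by_cases ht : texto = ""
          · simp [ht]
          · simp [ht, PySem.Dict.get?_insert_of_ne d texto (Ne.symm hk)]
      have hiff : (p ∈ k :: L) ↔ (p ∈ L) := by
        constructor
        · intro h
          rcases List.mem_cons.mp h with h | h
          · exact absurd h.symm hk
          · exact h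
        · exact List.mem_cons_of_mem _
      by_cases hmem : p ∈ L
      · simp only [if_pos (hiff.mpr hmem), if_pos hmem, hstep]
      · simp only [if_neg (fun h => hmem (hiff.mp h)), if_neg hmem, hstep]

-- one merged group, read back: the group's first-occurrence value if non-empty, else the accumulator
lemma mergedStep_get? (d : PySem.Dict String String) (g : List (String × String)) (p : String) :
    (mergedStep d g).get? p
      = match (PySem.Dict.mk g).get? p with
        | some texto => if texto ≠ "" then some texto else d.get? p
        | none => d.get? p := by
  unfold mergedStep
  rw [mergedStep_fold_get?]
  cases hg : (PySem.Dict.mk g).get? p with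
  | none =>
    have hnot : p ∉ (PySem.Dict.mk g).keys :=
      (PySem.Dict.get?_eq_none_iff_not_mem_keys _ _).mp hg
    rw [if_neg hnot]
  | some texto =>
    have hmem : p ∈ (PySem.Dict.mk g).keys := by
      by_contra hnot
      rw [(PySem.Dict.get?_eq_none_iff_not_mem_keys _ _).mpr hnot] at hg
      simp at hg
    rw [if_pos hmem]

-- B's reverse-merge index, read back per parameter, is exactly primerValor
lemma merged_getD (grupos : List (List (String × String))) (p : String) :
    (grupos.reverse.foldl mergedStep PySem.Dict.empty).getD p "" = primerValor grupos p := by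
  induction grupos with
  | nil => simp [primerValor]
  | cons g rest ih =>
    rw [List.reverse_cons, List.foldl_append, List.foldl_cons, List.foldl_nil,
      PySem.Dict.getD_eq_get?_getD, mergedStep_get?]
    have hprimer : primerValor (g :: rest) p =
        match (PySem.Dict.mk g).get? p with
        | some valor => if valor ≠ "" then valor else primerValor rest p
        | none => primerValor rest p := by
      simp [primerValor]
    rw [hprimer]
    cases hg : (PySem.Dict.mk g).get? p with
    | none => rw [← PySem.Dict.getD_eq_get?_getD, ih]
    | some texto =>
      by_cases ht : texto = ""
      · simp only [ht, ne_eq, not_true_eq_false, if_false]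
        rw [← PySem.Dict.getD_eq_get?_getD, ih]
      · simp [ht]

-- ===== VERDICT (by name: the statement is the Claim_ definition above) =====
theorem leer_parametros_spec : Claim_equal_leer_parametros := by
  intro elemento _
  show leer_parametros elemento = leer_parametros_alt elemento
  unfold leer_parametros leer_parametros_alt
  simp only [dic0_eq]
  rw [outer_fold]
  have hitems : ∀ l : List (String × String), (PySem.Dict.mk l).items = l := fun _ => rfl
  rw [hitems]
  apply List.map_congr_left
  intro p _
  rw [merged_getD]
  simp
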